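-- pv_equiv track=rewrite | github.com/youssefhage/ahtrading-erp-pos | scripts/ap_docs/packetize_and_import_ap_docs.py | _packet_primary_doc_type
-- ===== SOURCE A (Python) =====
-- from typing import Any, Optional
--
-- INVOICE_DOC_TYPES = {"invoice", "purchase_invoice", "supplier_invoice"}
--
-- def _norm(v: Any) -> str:
--     return str(v or "").strip()
--
-- def _packet_doc_types(rows: list[dict[str, str]]) -> set[str]:
--     out: set[str] = set()
--     for r in rows:
--         d = _norm(r.get("doc_type")).lower()
--         if d:
--             out.add(d)
--     return out
--
-- def _packet_primary_doc_type(rows: list[dict[str, str]]) -> str: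
--     ds = _packet_doc_types(rows)
--     if not ds:
--         return "unknown"
--     if any(d in INVOICE_DOC_TYPES for d in ds):
--         return "invoice"
--     if ds == {"unknown"}:
--         return "unknown"
--     if len(ds) == 1:
--         return next(iter(ds))
--     return "mixed_non_invoice"
-- ===== SOURCE B (Python) =====
-- INVOICE_DOC_TYPES = {"invoice", "purchase_invoice", "supplier_invoice"}
--
-- def _packet_primary_doc_type(rows):
--     has_invoice = False
--     representative = None
--     mixed = False
--     for r in rows:
--         d = str(r.get("doc_type") or "").strip().lower()
--         if not d:
--             continue
--         if d in INVOICE_DOC_TYPES: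
--             has_invoice = True
--         if representative is None:
--             representative = d
--         elif d != representative:
--             mixed = True
--     if representative is None:
--         return "unknown"
--     if has_invoice:
--         return "invoice"
--     if mixed:
--         return "mixed_non_invoice"
--     return representative
-- ===== Notes on version B (the rewrite author's own statement) =====
-- stated objective: simpler
-- what changed: Replaces A's build-a-set-of-doc-types plus four post-hoc set tests (any-invoice scan, =={'unknown'} comparison, len==1 extraction) by a single pass over the rows maintaining three scalars (has_invoice, first representative, mixed flag) and a four-way final decision.
import Mathlib
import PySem

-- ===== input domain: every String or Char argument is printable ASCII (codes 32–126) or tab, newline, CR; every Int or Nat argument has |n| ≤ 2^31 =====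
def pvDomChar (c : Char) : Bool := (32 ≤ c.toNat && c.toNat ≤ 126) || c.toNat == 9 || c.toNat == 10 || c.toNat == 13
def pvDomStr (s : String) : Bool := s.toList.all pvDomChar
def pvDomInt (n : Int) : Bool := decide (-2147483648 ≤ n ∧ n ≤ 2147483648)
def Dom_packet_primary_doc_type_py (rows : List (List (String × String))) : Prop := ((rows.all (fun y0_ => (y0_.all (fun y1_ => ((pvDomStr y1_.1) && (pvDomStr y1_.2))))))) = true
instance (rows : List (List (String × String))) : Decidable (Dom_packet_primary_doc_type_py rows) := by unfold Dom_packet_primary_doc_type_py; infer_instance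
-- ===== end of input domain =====

-- ===== PORT A =====
-- B replaces A's set-of-doc-types plus four post-hoc set tests by a single pass keeping three scalars (objective: simpler).
-- helpers of A: _norm and _packet_doc_types
def pvNorm (v : Option String) : String :=
  PySem.Str.strip (v.getD "")   -- str(v or "").strip(); v is a str-or-None, so 'v or ""' = getD ""

def pvInvoiceDocTypes : PySem.Set String :=
  PySem.Set.ofList ["invoice", "purchase_invoice", "supplier_invoice"]

def pvPacketDocTypes (rows : List (List (String × String))) : PySem.Set String :=
  rows.foldl (fun out r =>
    let d := PySem.Str.lower (pvNorm ((PySem.Dict.mk r).get? "doc_type"))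
    if d ≠ "" then PySem.Set.add out d else out) PySem.Set.empty

def packet_primary_doc_type_py (rows : List (List (String × String))) : String :=
  let ds := pvPacketDocTypes rows
  if ds.isEmpty then "unknown"
  else if ds.any (fun d => PySem.Set.contains pvInvoiceDocTypes d) then "invoice"
  else if PySem.Set.equal ds (PySem.Set.ofList ["unknown"]) then "unknown"
  else if ds.length = 1 then ds.headD ""     -- next(iter(ds)): guarded by len == 1, the sole element
  else "mixed_non_invoice"

-- ===== PORT B =====
-- loop state: (has_invoice, representative, mixed)
def pvBStep (st : Bool × Option String × Bool) (r : List (String × String)) :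
    Bool × Option String × Bool :=
  let d := PySem.Str.lower (PySem.Str.strip (((PySem.Dict.mk r).get? "doc_type").getD ""))
  if d = "" then st
  else
    let hi := st.1 || PySem.Set.contains pvInvoiceDocTypes d
    match st.2.1 with
    | none => (hi, some d, st.2.2)
    | some rep => (hi, some rep, st.2.2 || d ≠ rep)

def packet_primary_doc_type_py_alt (rows : List (List (String × String))) : String :=
  let st := rows.foldl pvBStep (false, none, false)
  match st.2.1 with
  | none => "unknown"
  | some rep => if st.1 then "invoice" else if st.2.2 then "mixed_non_invoice" else rep

-- ===== PRECONDITION & SPEC =====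
def Spec_packet_primary_doc_type_py (rows : List (List (String × String))) (out : String) : Prop := out = packet_primary_doc_type_py_alt rows
instance (rows : List (List (String × String))) (out : String) : Decidable (Spec_packet_primary_doc_type_py rows out) := by unfold Spec_packet_primary_doc_type_py; infer_instance

-- ===== CLAIM (what is proved, stated in full; the proofs are below) =====
def Claim_equal_packet_primary_doc_type_py : Prop := ∀ (rows : List (List (String × String))), Dom_packet_primary_doc_type_py rows → Spec_packet_primary_doc_type_py rows (packet_primary_doc_type_py rows)

-- ===== LEMMAS AND PROOFS =====

-- the invariant tying B's scalar state to A's growing set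
def pvAbs (ds : PySem.Set String) : Bool × Option String × Bool :=
  (ds.any (fun d => PySem.Set.contains pvInvoiceDocTypes d), ds.head?, decide (2 ≤ ds.length))

lemma pvStep_abs (ds : PySem.Set String) (hnd : ds.Nodup) (r : List (String × String)) :
    pvBStep (pvAbs ds) r
      = pvAbs (let d := PySem.Str.lower (pvNorm ((PySem.Dict.mk r).get? "doc_type"))
               if d ≠ "" then PySem.Set.add ds d else ds) := by
  simp only [pvBStep, pvNorm, pvAbs]
  set d := PySem.Str.lower (PySem.Str.strip (((PySem.Dict.mk r).get? "doc_type").getD "")) with hd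
  by_cases h0 : d = ""
  · simp [h0]
  · simp only [h0, ne_eq, not_false_eq_true, if_pos]
    by_cases hmem : d ∈ ds
    · rw [PySem.Set.add_of_mem hmem]
      cases ds with
      | nil => simp at hmem
      | cons a t =>
        simp only [List.head?_cons]
        refine Prod.ext ?_ (Prod.ext rfl ?_)
        · -- any: d ∈ ds so the new disjunct is absorbed
          cases hg : PySem.Set.contains pvInvoiceDocTypes d with
          | false => simp
          | true =>
            have hA : ((a :: t).any fun x => PySem.Set.contains pvInvoiceDocTypes x) = true :=
              List.any_eq_true.mpr ⟨d, hmem, hg⟩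
            simp
            rcases List.mem_cons.mp hmem with h | h
            · exact Or.inl (h ▸ (by simpa using hg))
            · exact Or.inr ⟨d, h, by simpa using hg⟩
        · -- mixed flag
          by_cases hda : d = a
          · simp [hda]
          · have ht : d ∈ t := by
              rcases List.mem_cons.mp hmem with h | h
              · exact absurd h hda
              · exact h
            have hl := List.length_pos_of_mem ht
            simp [hda]
            omega
    · rw [PySem.Set.add_of_not_mem hmem]
      cases ds with
      | nil => simp
      | cons a t =>
        have hda : d ≠ a := fun h => hmem (h ▸ List.mem_cons_self ..)
        refine Prod.ext ?_ (Prod.ext ?_ ?_)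
        · simp [List.any_append, Bool.or_assoc]
        · simp
        · simp [hda, List.length_append]

lemma pvLoop_abs (rows : List (List (String × String))) :
    ∀ (ds : PySem.Set String), ds.Nodup →
      rows.foldl pvBStep (pvAbs ds)
        = pvAbs (rows.foldl (fun out r =>
            let d := PySem.Str.lower (pvNorm ((PySem.Dict.mk r).get? "doc_type"))
            if d ≠ "" then PySem.Set.add out d else out) ds) ∧
      (rows.foldl (fun out r =>
            let d := PySem.Str.lower (pvNorm ((PySem.Dict.mk r).get? "doc_type"))
            if d ≠ "" then PySem.Set.add out d else out) ds).Nodup := by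
  induction rows with
  | nil => intro ds h; exact ⟨rfl, h⟩
  | cons r rs ih =>
    intro ds h
    simp only [List.foldl_cons]
    rw [pvStep_abs ds h r]
    apply ih
    dsimp only
    split
    · exact PySem.Set.nodup_add ds _ h
    · exact h

lemma pvSet_nodup (rows : List (List (String × String))) : (pvPacketDocTypes rows).Nodup :=
  (pvLoop_abs rows [] List.nodup_nil).2

lemma pvAlt_eq (rows : List (List (String × String))) :
    packet_primary_doc_type_py_alt rows
      = (let ds := pvPacketDocTypes rows
         match ds.head? with
         | none => "unknown"
         | some rep =>
             if ds.any (fun d => PySem.Set.contains pvInvoiceDocTypes d) then "invoice"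
             else if decide (2 ≤ ds.length) then "mixed_non_invoice" else rep) := by
  have h0 : (false, (none : Option String), false) = pvAbs [] := rfl
  unfold packet_primary_doc_type_py_alt
  rw [h0, (pvLoop_abs rows [] List.nodup_nil).1]
  rfl

-- ===== VERDICT (by name: the statement is the Claim_ definition above) =====
theorem packet_primary_doc_type_py_spec : Claim_equal_packet_primary_doc_type_py := by
  intro rows _
  unfold Spec_packet_primary_doc_type_py
  rw [pvAlt_eq]
  unfold packet_primary_doc_type_py
  have hnd := pvSet_nodup rows
  dsimp only
  cases hds : pvPacketDocTypes rows with
  | nil => rfl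
  | cons a t =>
    rw [hds] at hnd
    simp only [List.head?_cons, List.isEmpty_cons, Bool.false_eq_true, if_false]
    by_cases hinv : ((a :: t).any fun d => PySem.Set.contains pvInvoiceDocTypes d) = true
    · rw [if_pos hinv, if_pos hinv]
    · rw [if_neg hinv, if_neg hinv]
      cases t with
      | nil =>
        simp only [List.length_cons, List.length_nil]
        have hne2 : ¬ (2 ≤ 0 + 1) := by omega
        simp only [hne2, decide_eq_true_eq]
        simp [PySem.Set.equal, PySem.Set.issubset, PySem.Set.ofList, PySem.Set.add]
      | cons b t' =>
        have h2 : (2 : Nat) ≤ (a :: b :: t').length := by simp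
        have hne1 : (a :: b :: t').length ≠ 1 := by simp
        simp only [decide_eq_true_eq, if_pos h2, if_neg hne1]
        -- remains: the '== {"unknown"}' branch cannot fire on a ≥2-element nodup set
        have hneq : PySem.Set.equal (a :: b :: t') (PySem.Set.ofList ["unknown"]) ≠ true := by
          intro hu
          have hiff := (PySem.Set.equal_iff _ _).mp hu
          have ha : a = "unknown" := by
            have := (hiff a).mp (List.mem_cons_self ..)
            simpa [PySem.Set.mem_ofList] using this
          have hb : b = "unknown" := by
            have := (hiff b).mp (by simp)
            simpa [PySem.Set.mem_ofList] using this
          have : a ≠ b := by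
            have := List.nodup_cons.mp hnd
            exact fun h => this.1 (h ▸ List.mem_cons_self ..)
          exact this (ha.trans hb.symm)
        simp [hneq]
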